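-- pv_equiv track=rewrite | github.com/RenovationIGuess/Algorithm | ATTT/ManyTimeAttack/MTPA.py | space_posi_in_s
-- ===== SOURCE A (Python) =====
-- def space_posi_in_s(sp):
--     # Khác với hàm trên lần này ta sẽ tính số lần xuất hiện của " " khi XOR với các bản mã khác
--     # Như đề cập ở đầu code, ta làm việc với bản mã độ dài min
--     # Hay khi đó sp[0] lúc này là list gồm các vị trí có thể có
--     # space của ciphertext[i] với ciphertext có len min (XOR)
--     min_len = len(sp[0])
--
--     # Giả sử mọi vị trí đều thỏa mãn
--     check = [1] * min_len
--
--     for i in range(len(sp)):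
--         for j in range(min_len):
--             check[j] += sp[i][j]
--
--     for i in range(min_len):
--         # Nếu tần số lớn / = 7 (theo tham khảo đó là khoảng tiêu chuẩn vừa đủ ạ)
--         if check[i] > 9:
--             check[i] = 1
--         else:
--             check[i] = 0
--     return (check)
-- ===== SOURCE B (Python) =====
-- def space_posi_in_s(sp):
--     # Balanced divide-and-conquer: recursively vector-sum the two halves of
--     # the row range, then threshold the total column sums in one final map.
--     m = len(sp[0])
--
--     def vsum(lo, hi):
--         if hi - lo <= 1:
--             return [sp[lo][j] for j in range(m)]
--         mid = lo + (hi - lo) // 2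
--         left = vsum(lo, mid)
--         right = vsum(mid, hi)
--         return [left[j] + right[j] for j in range(m)]
--
--     return [1 if t + 1 > 9 else 0 for t in vsum(0, len(sp))]
-- ===== Notes on version B (the rewrite author's own statement) =====
-- stated objective: alternative
-- what changed: Replaces A's linear row-by-row in-place accumulation into a pre-seeded array plus a second thresholding rescan with a balanced divide-and-conquer: the row range is recursively split in half, the halves' column-sum vectors are added elementwise, and the total is thresholded in one final map.
import Mathlib
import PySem

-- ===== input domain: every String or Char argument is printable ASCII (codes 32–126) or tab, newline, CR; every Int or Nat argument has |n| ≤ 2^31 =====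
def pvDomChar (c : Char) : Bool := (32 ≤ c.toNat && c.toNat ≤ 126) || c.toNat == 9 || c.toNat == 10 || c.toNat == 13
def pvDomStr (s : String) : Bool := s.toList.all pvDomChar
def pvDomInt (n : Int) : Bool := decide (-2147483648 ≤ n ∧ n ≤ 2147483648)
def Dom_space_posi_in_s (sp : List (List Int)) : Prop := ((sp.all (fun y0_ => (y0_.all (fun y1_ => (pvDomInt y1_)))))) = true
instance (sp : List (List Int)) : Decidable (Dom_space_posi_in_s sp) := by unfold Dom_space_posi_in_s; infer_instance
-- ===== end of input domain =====

-- B replaces A's linear row-by-row accumulation + rescan with a balanced divide-and-conquer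
-- over the row range (elementwise add of the halves' column-sum vectors); same cost, different algorithmic shape.

-- ===== PORT A =====
-- indices produced by range are nonnegative and (under Pre_) in range, so
-- `set j.toNat` / `pyGetD … 0` are exact for Python's `check[j] = …` / reads
def space_posi_in_s (sp : List (List Int)) : List Int :=
  let min_len : Int := PySem.List.len (PySem.List.pyGetD sp 0 [])
  let check : List Int := List.replicate min_len.toNat 1
  let check :=
    (PySem.List.pyRange 0 (PySem.List.len sp) 1).foldl
      (fun check i =>
        (PySem.List.pyRange 0 min_len 1).foldl
          (fun check j =>
            check.set j.toNat
              (PySem.List.pyGetD check j 0 +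
                PySem.List.pyGetD (PySem.List.pyGetD sp i []) j 0)) check) check
  let check :=
    (PySem.List.pyRange 0 min_len 1).foldl
      (fun check i =>
        check.set i.toNat (if PySem.List.pyGetD check i 0 > 9 then 1 else 0)) check
  check

-- ===== PORT B =====
-- vsum(lo, hi): column-sum vector of rows lo..hi-1, by splitting the range in half
def pvVsum (sp : List (List Int)) (m : Int) (lo hi : Int) : List Int :=
  if _h : hi - lo ≤ 1 then
    (PySem.List.pyRange 0 m 1).map
      (fun j => PySem.List.pyGetD (PySem.List.pyGetD sp lo []) j 0)
  else
    let mid := lo + PySem.Int.floordiv (hi - lo) 2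
    let left := pvVsum sp m lo mid
    let right := pvVsum sp m mid hi
    (PySem.List.pyRange 0 m 1).map
      (fun j => PySem.List.pyGetD left j 0 + PySem.List.pyGetD right j 0)
termination_by (hi - lo).toNat
decreasing_by
  · rw [PySem.Int.floordiv_eq_ediv_of_pos (by omega)]; omega
  · rw [PySem.Int.floordiv_eq_ediv_of_pos (by omega)]; omega

def space_posi_in_s_alt (sp : List (List Int)) : List Int :=
  let m : Int := PySem.List.len (PySem.List.pyGetD sp 0 [])
  (pvVsum sp m 0 (PySem.List.len sp)).map (fun t => if t + 1 > 9 then (1 : Int) else 0)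

-- ===== PRECONDITION & SPEC =====
-- Pre_ excludes exactly the inputs where Python A raises IndexError: the empty
-- list (sp[0]) and ragged inputs with a row shorter than the first row.
def Pre_space_posi_in_s (sp : List (List Int)) : Prop :=
  sp ≠ [] ∧ ∀ row ∈ sp, (sp.headD []).length ≤ row.length
instance (sp : List (List Int)) : Decidable (Pre_space_posi_in_s sp) := by
  unfold Pre_space_posi_in_s; infer_instance
def pvWitness_space_posi_in_s : List (List Int) := [[1, 2], [9, 4]]

def Spec_space_posi_in_s (sp : List (List Int)) (out : List Int) : Prop := out = space_posi_in_s_alt sp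
instance (sp : List (List Int)) (out : List Int) : Decidable (Spec_space_posi_in_s sp out) := by unfold Spec_space_posi_in_s; infer_instance

-- ===== CLAIM (what is proved, stated in full; the proofs are below) =====
def Claim_equal_space_posi_in_s : Prop := ∀ (sp : List (List Int)), Dom_space_posi_in_s sp → Pre_space_posi_in_s sp → Spec_space_posi_in_s sp (space_posi_in_s sp)

-- ===== LEMMAS AND PROOFS =====

-- one in-place pass `for j in range(n): ch[j] = F(ch[j], j)` over a list of
-- shape `map ++ tail` acts pointwise on the mapped prefix
theorem pv_foldl_set (F : Int → Int → Int) :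
    ∀ (n : Nat) (tail : List Int) (g : Nat → Int),
      (PySem.List.pyRange 0 (n : Int) 1).foldl
          (fun ch j => ch.set j.toNat (F (PySem.List.pyGetD ch j 0) j))
          ((List.range n).map g ++ tail)
        = (List.range n).map (fun k => F (g k) (k : Int)) ++ tail := by
  intro n
  induction n with
  | zero => intro tail g; simp [PySem.List.pyRange_one_eq_nil]
  | succ n ih =>
    intro tail g
    have h1 : PySem.List.pyRange 0 ((n + 1 : Nat) : Int) 1
        = PySem.List.pyRange 0 (n : Int) 1 ++ [(n : Int)] := by
      push_cast
      exact PySem.List.pyRange_one_succ_right (by positivity)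
    rw [h1, List.foldl_append, List.range_succ, List.map_append, List.append_assoc,
      List.map_singleton, List.singleton_append, ih (g n :: tail) g]
    simp only [List.foldl_cons, List.foldl_nil, PySem.List.pyGetD_natCast, Int.toNat_natCast]
    have hlen : ((List.range n).map fun k => F (g k) (k : Int)).length = n := by simp
    rw [List.getD_append_right _ _ _ _ (le_of_eq hlen), List.set_append, if_neg (by omega)]
    simp [hlen]

-- the row-accumulation double loop computes column sums on top of the seed g
theorem pv_outer_inv (m : Nat) :
    ∀ (rows : List (List Int)) (g : Nat → Int),
      rows.foldl
          (fun ch row =>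
            (PySem.List.pyRange 0 (m : Int) 1).foldl
              (fun ch j =>
                ch.set j.toNat
                  (PySem.List.pyGetD ch j 0 + PySem.List.pyGetD row j 0)) ch)
          ((List.range m).map g)
        = (List.range m).map
            (fun k => g k + (rows.map fun r => PySem.List.pyGetD r (k : Int) 0).sum) := by
  intro rows
  induction rows with
  | nil => intro g; simp
  | cons r rows ih =>
    intro g
    rw [List.foldl_cons]
    have h := pv_foldl_set (fun v j => v + PySem.List.pyGetD r j 0) m [] g
    rw [List.append_nil, List.append_nil] at h
    rw [h, ih]
    simp [add_assoc]

theorem pv_A_eq (sp : List (List Int)) :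
    space_posi_in_s sp
      = (List.range (PySem.List.pyGetD sp 0 []).length).map
          (fun k : Nat =>
            if 1 + (sp.map fun r => PySem.List.pyGetD r ((k : Nat) : Int) 0).sum > 9 then 1 else 0) := by
  unfold space_posi_in_s
  simp only [PySem.List.len_eq, Int.toNat_natCast]
  have hrep : List.replicate (PySem.List.pyGetD sp 0 []).length (1 : Int)
      = (List.range (PySem.List.pyGetD sp 0 []).length).map (fun _ => (1 : Int)) := by
    simp
  rw [hrep]
  have hA := PySem.List.foldl_pyRange_zero_pyGetD' sp ([] : List Int)
      (fun check row =>
        (PySem.List.pyRange 0 ((PySem.List.pyGetD sp 0 []).length : Int) 1).foldl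
          (fun check j =>
            check.set j.toNat
              (PySem.List.pyGetD check j 0 + PySem.List.pyGetD row j 0)) check)
      ((List.range (PySem.List.pyGetD sp 0 []).length).map (fun _ => (1 : Int)))
  rw [hA, pv_outer_inv]
  have h := pv_foldl_set (fun v _ => if v > 9 then 1 else 0)
      (PySem.List.pyGetD sp 0 []).length []
      (fun k => 1 + (sp.map fun r => PySem.List.pyGetD r (k : Int) 0).sum)
  rw [List.append_nil, List.append_nil] at h
  exact h

-- pvVsum on a valid subrange computes exactly the column sums of rows lo..hi-1
theorem pv_vsum_eq (sp : List (List Int)) (m : Int) :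
    ∀ (n : Nat) (lo hi : Int), 0 ≤ lo → lo < hi → hi ≤ sp.length →
      (hi - lo).toNat = n →
      pvVsum sp m lo hi
        = (PySem.List.pyRange 0 m 1).map
            (fun j =>
              (((sp.drop lo.toNat).take (hi - lo).toNat).map
                (fun r => PySem.List.pyGetD r j 0)).sum) := by
  intro n
  induction n using Nat.strong_induction_on with
  | _ n ih =>
    intro lo hi hlo hlt hhi hn
    rw [pvVsum]
    by_cases hb : hi - lo ≤ 1
    · rw [dif_pos hb]
      have hone : hi - lo = 1 := by omega
      apply List.map_congr_left
      intro j _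
      have htake : (sp.drop lo.toNat).take (hi - lo).toNat
          = [sp.getD lo.toNat []] := by
        rw [hone]
        have hlen : lo.toNat < sp.length := by omega
        rw [List.getD_eq_getElem _ _ (by omega)]
        rw [show ((1:Int)).toNat = 1 from rfl, List.take_one, List.head?_drop,
          List.getElem?_eq_getElem (by omega)]
        simp
      rw [htake]
      have : PySem.List.pyGetD sp lo [] = sp.getD lo.toNat [] := by
        have := PySem.List.pyGetD_natCast sp lo.toNat ([] : List Int)
        rwa [Int.toNat_of_nonneg hlo] at this
      simp [this]
    · rw [dif_neg hb]
      have hfd : PySem.Int.floordiv (hi - lo) 2 = (hi - lo) / 2 :=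
        PySem.Int.floordiv_eq_ediv_of_pos (by omega)
      set mid := lo + PySem.Int.floordiv (hi - lo) 2 with hmid
      have hmb : lo < mid ∧ mid < hi := by rw [hmid, hfd]; omega
      have hL := ih (mid - lo).toNat (by omega) lo mid hlo hmb.1 (by omega) rfl
      have hR := ih (hi - mid).toNat (by omega) mid hi (by omega) hmb.2 hhi rfl
      simp only [hL, hR]
      apply List.map_congr_left
      intro j hj
      obtain ⟨hjn, hjm⟩ := PySem.List.mem_pyRange_one.mp hj
      rw [PySem.List.pyGetD_map_pyRange_of_nonneg _ _ _ _ hjn hjm,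
          PySem.List.pyGetD_map_pyRange_of_nonneg _ _ _ _ hjn hjm]
      have hsplit : (sp.drop lo.toNat).take (hi - lo).toNat
          = (sp.drop lo.toNat).take (mid - lo).toNat
            ++ (sp.drop mid.toNat).take (hi - mid).toNat := by
        have h1 : (hi - lo).toNat = (mid - lo).toNat + (hi - mid).toNat := by omega
        rw [h1, List.take_add, List.drop_drop,
          show lo.toNat + (mid - lo).toNat = mid.toNat by omega]
      rw [hsplit, List.map_append, List.sum_append]

theorem pv_B_eq (sp : List (List Int)) (hne : sp ≠ []) :
    space_posi_in_s_alt sp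
      = (List.range (PySem.List.pyGetD sp 0 []).length).map
          (fun k : Nat =>
            if (sp.map fun r => PySem.List.pyGetD r ((k : Nat) : Int) 0).sum + 1 > 9 then 1 else 0) := by
  unfold space_posi_in_s_alt
  simp only [PySem.List.len_eq]
  have hlen : 0 < sp.length := List.length_pos_of_ne_nil hne
  rw [pv_vsum_eq sp _ (sp.length : Int).toNat 0 (sp.length : Int) le_rfl (by exact_mod_cast hlen)
      le_rfl (by omega)]
  have hall : (sp.drop (0 : Int).toNat).take ((sp.length : Int) - 0).toNat = sp := by
    simp
  rw [hall, List.map_map]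
  have hr : PySem.List.pyRange 0 ((PySem.List.pyGetD sp 0 []).length : Int) 1
      = (List.range (PySem.List.pyGetD sp 0 []).length).map (fun k : Nat => (k : Int)) := by
    simp [PySem.List.pyRange_one]
  rw [hr, List.map_map]
  rfl

-- ===== VERDICT (by name: the statement is the Claim_ definition above) =====
theorem space_posi_in_s_spec : Claim_equal_space_posi_in_s := by
  intro sp _ hpre
  unfold Spec_space_posi_in_s
  rw [pv_A_eq, pv_B_eq sp hpre.1]
  apply List.map_congr_left
  intro k _
  rw [add_comm]
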